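-- pv_equiv track=rewrite | github.com/jstep750/VideoOcr | video-ocr/c_code_union.py | compare_brackets_num
-- ===== SOURCE A (Python) =====
-- def compare_brackets_num(str1, str2):
--     brackets = ['<','>','[',']','(',')','{','}']
--     dic = {x:[0,0] for x in brackets}
--     for c in str1:
--         if c in dic: dic[c][0] += 1
--
--     for c in str2:
--         if c in dic: dic[c][1] += 1
--
--     result = 0
--     for k in dic:
--         c1, c2 = dic[k]
--         result += abs(c1-c2)
--     return result
-- ===== SOURCE B (Python) =====
-- def compare_brackets_num(str1, str2):
--     bs = set('<>[](){}')
--     xs = sorted(c for c in str1 if c in bs)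
--     ys = sorted(c for c in str2 if c in bs)
--     i = j = r = 0
--     while i < len(xs) and j < len(ys):
--         if xs[i] == ys[j]:
--             i += 1
--             j += 1
--         elif xs[i] < ys[j]:
--             i += 1
--             r += 1
--         else:
--             j += 1
--             r += 1
--     return r + (len(xs) - i) + (len(ys) - j)
-- ===== Notes on version B (the rewrite author's own statement) =====
-- stated objective: alternative
-- what changed: B replaces A's per-character count table entirely: it filters each string to its bracket characters, sorts both filtered lists, and computes the answer as the size of their multiset symmetric difference with a two-pointer merge that cancels matching brackets, so no counts are ever taken.
import Mathlib
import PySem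

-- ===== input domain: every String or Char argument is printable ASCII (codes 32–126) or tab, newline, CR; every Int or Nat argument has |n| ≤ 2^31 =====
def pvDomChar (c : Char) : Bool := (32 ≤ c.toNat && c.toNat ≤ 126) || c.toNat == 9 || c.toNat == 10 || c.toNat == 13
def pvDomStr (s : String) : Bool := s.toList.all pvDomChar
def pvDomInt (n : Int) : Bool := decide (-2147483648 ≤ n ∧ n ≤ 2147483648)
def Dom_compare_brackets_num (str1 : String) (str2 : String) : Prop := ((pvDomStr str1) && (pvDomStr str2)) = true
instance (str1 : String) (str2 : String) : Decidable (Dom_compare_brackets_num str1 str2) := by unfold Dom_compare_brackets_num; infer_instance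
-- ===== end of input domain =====

-- B drops A's count table: it filters each string to its brackets, sorts both lists, and
-- counts the unmatched elements of a two-pointer merge (multiset symmetric difference);
-- an alternative algorithm of similar cost.

-- ===== PORT A =====
-- loop body of 'for c in str1: if c in dic: dic[c][0] += 1'
def cbStep1 (d : PySem.Dict Char (Int × Int)) (c : Char) : PySem.Dict Char (Int × Int) :=
  if d.contains c then d.modify c (0, 0) (fun p => (p.1 + 1, p.2)) else d

-- loop body of 'for c in str2: if c in dic: dic[c][1] += 1'
def cbStep2 (d : PySem.Dict Char (Int × Int)) (c : Char) : PySem.Dict Char (Int × Int) :=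
  if d.contains c then d.modify c (0, 0) (fun p => (p.1, p.2 + 1)) else d

def compare_brackets_num (str1 : String) (str2 : String) : Int :=
  let brackets : List Char := ['<', '>', '[', ']', '(', ')', '{', '}']
  let dic : PySem.Dict Char (Int × Int) :=
    brackets.foldl (fun d x => d.insert x (0, 0)) PySem.Dict.empty
  let dic := str1.toList.foldl cbStep1 dic
  let dic := str2.toList.foldl cbStep2 dic
  dic.keys.foldl (fun result k =>
    let p := dic.getD k (0, 0)
    result + |p.1 - p.2|) 0

-- ===== PORT B =====
-- the while loop over indices i, j, r; recursion on the two list suffixes, r accumulated in the result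
def cbMerge : List Char → List Char → Int
  | [], ys => ys.length
  | x :: xs, [] => (x :: xs).length
  | x :: xs, y :: ys =>
    if x = y then cbMerge xs ys
    else if x < y then 1 + cbMerge xs (y :: ys)
    else 1 + cbMerge (x :: xs) ys

def compare_brackets_num_alt (str1 : String) (str2 : String) : Int :=
  let bs : PySem.Set Char := PySem.Set.ofList ("<>[](){}").toList
  let xs := PySem.List.sorted (str1.toList.filter (fun c => bs.contains c)) (fun x => x) false
  let ys := PySem.List.sorted (str2.toList.filter (fun c => bs.contains c)) (fun x => x) false
  cbMerge xs ys

-- ===== PRECONDITION & SPEC =====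
def Spec_compare_brackets_num (str1 : String) (str2 : String) (out : Int) : Prop := out = compare_brackets_num_alt str1 str2
instance (str1 : String) (str2 : String) (out : Int) : Decidable (Spec_compare_brackets_num str1 str2 out) := by unfold Spec_compare_brackets_num; infer_instance

-- ===== CLAIM (what is proved, stated in full; the proofs are below) =====
def Claim_equal_compare_brackets_num : Prop := ∀ (str1 : String) (str2 : String), Dom_compare_brackets_num str1 str2 → Spec_compare_brackets_num str1 str2 (compare_brackets_num str1 str2)

-- ===== LEMMAS AND PROOFS =====

def cbB : List Char := ['<', '>', '[', ']', '(', ')', '{', '}']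

-- the common yardstick both programs are reduced to
def cbSn (xs ys : List Char) : Nat :=
  (cbB.map (fun b => ((xs.count b : Int) - (ys.count b : Int)).natAbs)).sum

-- ===== A-side lemmas =====

theorem fold1_contains (l : List Char) (d : PySem.Dict Char (Int × Int)) (k : Char) :
    (l.foldl cbStep1 d).contains k = d.contains k := by
  induction l generalizing d with
  | nil => rfl
  | cons c t ih =>
    simp only [List.foldl_cons]
    rw [ih]
    unfold cbStep1
    split
    · rename_i h
      rw [PySem.Dict.contains_modify]
      by_cases hkc : k = c
      · simp [hkc, h]
      · simp [hkc]
    · rfl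

theorem fold1_keys (l : List Char) (d : PySem.Dict Char (Int × Int)) :
    (l.foldl cbStep1 d).keys = d.keys := by
  induction l generalizing d with
  | nil => rfl
  | cons c t ih =>
    simp only [List.foldl_cons]
    rw [ih]
    unfold cbStep1
    split
    · rename_i h
      rw [PySem.Dict.keys_modify, PySem.Dict.keys_insert_of_contains _ _ h]
    · rfl

theorem fold2_keys (l : List Char) (d : PySem.Dict Char (Int × Int)) :
    (l.foldl cbStep2 d).keys = d.keys := by
  induction l generalizing d with
  | nil => rfl
  | cons c t ih =>
    simp only [List.foldl_cons]
    rw [ih]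
    unfold cbStep2
    split
    · rename_i h
      rw [PySem.Dict.keys_modify, PySem.Dict.keys_insert_of_contains _ _ h]
    · rfl

theorem fold1_getD (l : List Char) (d : PySem.Dict Char (Int × Int)) (k : Char)
    (hk : d.contains k = true) :
    (l.foldl cbStep1 d).getD k (0, 0)
      = ((d.getD k (0, 0)).1 + (l.count k : Int), (d.getD k (0, 0)).2) := by
  induction l generalizing d with
  | nil => simp
  | cons c t ih =>
    simp only [List.foldl_cons]
    by_cases hc : d.contains c = true
    · have hd : cbStep1 d c = d.modify c (0, 0) (fun p => (p.1 + 1, p.2)) := by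
        simp [cbStep1, hc]
      rw [hd, ih _ (by simp [PySem.Dict.contains_modify, hk])]
      rw [PySem.Dict.getD_modify]
      by_cases hkc : k = c
      · subst hkc
        simp
        ring
      · simp [hkc, Ne.symm hkc]
    · have hd : cbStep1 d c = d := by simp [cbStep1, hc]
      rw [hd, ih _ hk]
      have hkc : k ≠ c := by intro h; subst h; rw [hk] at hc; exact hc rfl
      simp [Ne.symm hkc]

theorem fold2_getD (l : List Char) (d : PySem.Dict Char (Int × Int)) (k : Char)
    (hk : d.contains k = true) :
    (l.foldl cbStep2 d).getD k (0, 0)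
      = ((d.getD k (0, 0)).1, (d.getD k (0, 0)).2 + (l.count k : Int)) := by
  induction l generalizing d with
  | nil => simp
  | cons c t ih =>
    simp only [List.foldl_cons]
    by_cases hc : d.contains c = true
    · have hd : cbStep2 d c = d.modify c (0, 0) (fun p => (p.1, p.2 + 1)) := by
        simp [cbStep2, hc]
      rw [hd, ih _ (by simp [PySem.Dict.contains_modify, hk])]
      rw [PySem.Dict.getD_modify]
      by_cases hkc : k = c
      · subst hkc
        simp
        ring
      · simp [hkc, Ne.symm hkc]
    · have hd : cbStep2 d c = d := by simp [cbStep2, hc]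
      rw [hd, ih _ hk]
      have hkc : k ≠ c := by intro h; subst h; rw [hk] at hc; exact hc rfl
      simp [Ne.symm hkc]

def cbInit : PySem.Dict Char (Int × Int) :=
  (['<', '>', '[', ']', '(', ')', '{', '}'] : List Char).foldl
    (fun d x => d.insert x (0, 0)) PySem.Dict.empty

theorem dic_final_getD (l1 l2 : List Char) (k : Char)
    (hc : cbInit.contains k = true) (h0 : cbInit.getD k (0, 0) = (0, 0)) :
    ((l2.foldl cbStep2 (l1.foldl cbStep1 cbInit)).getD k (0, 0))
      = ((l1.count k : Int), (l2.count k : Int)) := by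
  rw [fold2_getD _ _ _ (by rw [fold1_contains]; exact hc),
      fold1_getD _ _ _ hc, h0]
  simp

-- A's value is the per-bracket sum of absolute count differences
theorem a_eq_sn (str1 str2 : String) :
    compare_brackets_num str1 str2 = (cbSn str1.toList str2.toList : Int) := by
  unfold compare_brackets_num
  show (str2.toList.foldl cbStep2 (str1.toList.foldl cbStep1 cbInit)).keys.foldl
      (fun result k =>
        let p := (str2.toList.foldl cbStep2 (str1.toList.foldl cbStep1 cbInit)).getD k (0, 0)
        result + |p.1 - p.2|) 0 = _
  have hkeys : ((str2.toList.foldl cbStep2 (str1.toList.foldl cbStep1 cbInit))).keys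
      = ['<', '>', '[', ']', '(', ')', '{', '}'] := by
    rw [fold2_keys, fold1_keys]; decide
  rw [hkeys]
  have h1 := dic_final_getD str1.toList str2.toList '<' (by decide) (by decide)
  have h2 := dic_final_getD str1.toList str2.toList '>' (by decide) (by decide)
  have h3 := dic_final_getD str1.toList str2.toList '[' (by decide) (by decide)
  have h4 := dic_final_getD str1.toList str2.toList ']' (by decide) (by decide)
  have h5 := dic_final_getD str1.toList str2.toList '(' (by decide) (by decide)
  have h6 := dic_final_getD str1.toList str2.toList ')' (by decide) (by decide)
  have h7 := dic_final_getD str1.toList str2.toList '{' (by decide) (by decide)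
  have h8 := dic_final_getD str1.toList str2.toList '}' (by decide) (by decide)
  simp only [List.foldl_cons, List.foldl_nil, h1, h2, h3, h4, h5, h6, h7, h8,
    cbSn, cbB, List.map_cons, List.map_nil, List.sum_cons, List.sum_nil]
  simp only [Int.abs_eq_natAbs]
  push_cast
  ring

-- ===== B-side lemmas =====

-- change only the x-entry of a map-sum over a duplicate-free index list
theorem map_sum_shift (L : List Char) (f g : Char → Nat) (x : Char) (d : Nat)
    (hx : x ∈ L) (hL : L.Nodup) (hfx : f x = g x + d)
    (hother : ∀ b ∈ L, b ≠ x → f b = g b) :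
    (L.map f).sum = (L.map g).sum + d := by
  induction L with
  | nil => cases hx
  | cons a t ih =>
    simp only [List.map_cons, List.sum_cons]
    rcases List.mem_cons.mp hx with h | h
    · subst h
      have : ∀ b ∈ t, f b = g b := by
        intro b hb
        exact hother b (List.mem_cons_of_mem _ hb) (fun e => (List.nodup_cons.mp hL).1 (e ▸ hb))
      rw [hfx, List.map_congr_left this]
      omega
    · have hax : a ≠ x := fun e => (List.nodup_cons.mp hL).1 (e ▸ h)
      rw [hother a (List.mem_cons_self) hax,
        ih h (List.nodup_cons.mp hL).2
          (fun b hb hbx => hother b (List.mem_cons_of_mem _ hb) hbx)]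
      omega

theorem sum_count_eq_length (xs : List Char) (h : ∀ c ∈ xs, c ∈ cbB) :
    (cbB.map (fun b => xs.count b)).sum = xs.length := by
  induction xs with
  | nil => decide
  | cons x t ih =>
    have := map_sum_shift cbB (fun b => (x :: t).count b) (fun b => t.count b) x 1
      (h x List.mem_cons_self) (by decide)
      (by simp)
      (by intro b _ hbx; simp [Ne.symm hbx])
    rw [this, ih (fun c hc => h c (List.mem_cons_of_mem _ hc))]
    simp

theorem sn_nil_right (xs : List Char) (h : ∀ c ∈ xs, c ∈ cbB) :
    cbSn xs [] = xs.length := by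
  unfold cbSn
  rw [show (cbB.map (fun b => ((xs.count b : Int) - (([] : List Char).count b : Int)).natAbs))
      = cbB.map (fun b => xs.count b) by
    apply List.map_congr_left; intro b _; simp]
  exact sum_count_eq_length xs h

theorem sn_nil_left (ys : List Char) (h : ∀ c ∈ ys, c ∈ cbB) :
    cbSn [] ys = ys.length := by
  unfold cbSn
  rw [show (cbB.map (fun b => ((([] : List Char).count b : Int) - (ys.count b : Int)).natAbs))
      = cbB.map (fun b => ys.count b) by
    apply List.map_congr_left; intro b _; simp]
  exact sum_count_eq_length ys h

theorem merge_eq_sn (xs ys : List Char)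
    (hx : xs.Pairwise (· ≤ ·)) (hy : ys.Pairwise (· ≤ ·))
    (hax : ∀ c ∈ xs, c ∈ cbB) (hay : ∀ c ∈ ys, c ∈ cbB) :
    cbMerge xs ys = (cbSn xs ys : Int) := by
  induction xs, ys using cbMerge.induct with
  | case1 ys =>
    rw [sn_nil_left ys hay]; simp [cbMerge]
  | case2 x xs =>
    rw [sn_nil_right (x :: xs) hax]; simp [cbMerge]
  | case3 xs x ys ih =>
    rw [show cbMerge (x :: xs) (x :: ys) = cbMerge xs ys by simp [cbMerge]]
    rw [ih hx.of_cons hy.of_cons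
        (fun c hc => hax c (List.mem_cons_of_mem _ hc))
        (fun c hc => hay c (List.mem_cons_of_mem _ hc))]
    congr 1
    unfold cbSn
    congr 1
    apply List.map_congr_left
    intro b _
    simp only [List.count_cons]
    by_cases hbx : b = x
    · subst hbx; simp
    · simp [Ne.symm hbx]
  | case4 x xs y ys hne hlt ih =>
    have hcy : (y :: ys).count x = 0 := by
      apply List.count_eq_zero.mpr
      intro hmem
      rcases List.mem_cons.mp hmem with h | h
      · exact hne h
      · exact absurd (List.rel_of_pairwise_cons hy h) (not_le.mpr hlt)
    rw [show cbMerge (x :: xs) (y :: ys) = 1 + cbMerge xs (y :: ys) by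
      simp [cbMerge, hne, hlt]]
    rw [ih hx.of_cons hy (fun c hc => hax c (List.mem_cons_of_mem _ hc)) hay]
    have hshift := map_sum_shift cbB
      (fun b => (((x :: xs).count b : Int) - ((y :: ys).count b : Int)).natAbs)
      (fun b => ((xs.count b : Int) - ((y :: ys).count b : Int)).natAbs) x 1
      (hax x List.mem_cons_self) (by decide)
      (by simp only [List.count_cons_self, hcy]; push_cast; omega)
      (by intro b _ hbx; simp [List.count_cons, Ne.symm hbx])
    have h2 : cbSn (x :: xs) (y :: ys) = cbSn xs (y :: ys) + 1 := by
      unfold cbSn; exact hshift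
    rw [h2]; push_cast; ring
  | case5 x xs y ys hne hnlt ih =>
    have hyx : y < x := lt_of_le_of_ne (not_lt.mp hnlt) (fun e => hne e.symm)
    have hcx : (x :: xs).count y = 0 := by
      apply List.count_eq_zero.mpr
      intro hmem
      rcases List.mem_cons.mp hmem with h | h
      · exact hne h.symm
      · exact absurd (List.rel_of_pairwise_cons hx h) (not_le.mpr hyx)
    rw [show cbMerge (x :: xs) (y :: ys) = 1 + cbMerge (x :: xs) ys by
      simp [cbMerge, hne, hnlt]]
    rw [ih hx hy.of_cons hax (fun c hc => hay c (List.mem_cons_of_mem _ hc))]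
    have hshift := map_sum_shift cbB
      (fun b => (((x :: xs).count b : Int) - ((y :: ys).count b : Int)).natAbs)
      (fun b => (((x :: xs).count b : Int) - (ys.count b : Int)).natAbs) y 1
      (hay y List.mem_cons_self) (by decide)
      (by simp only [List.count_cons_self, hcx]; push_cast; omega)
      (by intro b _ hby; simp [List.count_cons, Ne.symm hby])
    have h2 : cbSn (x :: xs) (y :: ys) = cbSn (x :: xs) ys + 1 := by
      unfold cbSn; exact hshift
    rw [h2]; push_cast; ring

-- counts survive the filter-then-sort pipeline, for bracket characters
theorem count_pipeline (l : List Char) (b : Char) (hb : b ∈ cbB) :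
    (PySem.List.sorted (l.filter (fun c => PySem.Set.contains cbB c)) (fun x => x) false).count b
      = l.count b := by
  rw [(PySem.List.sorted_perm _ _ _).count_eq]
  rw [List.count_filter]
  simp [PySem.Set.contains, hb]

theorem pipeline_mem (l : List Char) (c : Char)
    (hc : c ∈ PySem.List.sorted (l.filter (fun c => PySem.Set.contains cbB c)) (fun x => x) false) :
    c ∈ cbB := by
  rw [PySem.List.mem_sorted] at hc
  have := List.of_mem_filter hc
  simpa [PySem.Set.contains] using this

-- ===== VERDICT (by name: the statement is the Claim_ definition above) =====
theorem compare_brackets_num_spec : Claim_equal_compare_brackets_num := by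
  intro str1 str2 _
  unfold Spec_compare_brackets_num
  rw [a_eq_sn]
  unfold compare_brackets_num_alt
  have hbs : (PySem.Set.ofList ("<>[](){}").toList : List Char) = cbB := by decide
  simp only [hbs]
  rw [merge_eq_sn _ _ (PySem.List.sorted_pairwise _ _) (PySem.List.sorted_pairwise _ _)
      (pipeline_mem str1.toList) (pipeline_mem str2.toList)]
  congr 1
  unfold cbSn
  congr 1
  apply List.map_congr_left
  intro b hb
  rw [count_pipeline _ _ hb, count_pipeline _ _ hb]
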